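-- pv_equiv track=rewrite | github.com/lindiloo0407/introduction-to-python | MUD/utils/utils.py | diku_to_ansi
-- ===== SOURCE A (Python) =====
-- RESET = "\033[0m"
--
-- def _ansi(code: int, bold: bool = False) -> str:
--     return f"\033[1;{code}m" if bold else f"\033[{code}m"
--
-- _BARE = {
--     "x": (30, False),  "X": (30, True),
--     "r": (31, False),  "R": (31, True),
--     "g": (32, False),  "G": (32, True),
--     "y": (33, False),  "Y": (33, True),
--     "b": (34, False),  "B": (34, True),
--     "m": (35, False),  "M": (35, True),
--     "c": (36, False),  "C": (36, True),
--     "w": (37, False),  "W": (37, True),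
-- }
--
-- _PLUS = {ch.lower(): (code, True) for ch, (code, _) in _BARE.items()}
--
-- def _tokenize(text: str):
--     """
--     Yield (kind, value) tuples:
--         ("text",   str)
--         ("color",  (ansi_code, bold))
--         ("reset",  None)
--     """
--     i = 0
--     n = len(text)
--     while i < n:
--         if text[i] != "&":
--             # collect a run of plain characters
--             j = i + 1
--             while j < n and text[j] != "&":
--                 j += 1
--             yield ("text", text[i:j])
--             i = j
--             continue
--
--         if i + 1 >= n:
--             yield ("text", "&"); i += 1; continue
--
--         ch = text[i + 1]
--
--         if ch == "&":
--             yield ("text", "&"); i += 2; continue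
--
--         if ch in ("N", "n"):
--             yield ("reset", None); i += 2; continue
--
--         if ch == "+" and i + 2 < n:
--             entry = _PLUS.get(text[i + 2])
--             if entry:
--                 yield ("color", entry); i += 3; continue
--             yield ("text", "&"); i += 1; continue
--
--         entry = _BARE.get(ch)
--         if entry:
--             yield ("color", entry); i += 2; continue
--
--         yield ("text", "&"); i += 1
--
-- def diku_to_ansi(text: str) -> str:
--     """Replace Diku color codes with ANSI escape sequences."""
--     parts = []
--     for kind, value in _tokenize(text):
--         if kind == "text":
--             parts.append(value)
--         elif kind == "color":
--             parts.append(_ansi(*value))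
--         elif kind == "reset":
--             parts.append(RESET)
--     return "".join(parts)
-- ===== SOURCE B (Python) =====
-- RESET = "\033[0m"
--
-- def _esc(code, bold=False):
--     return f"\033[1;{code}m" if bold else f"\033[{code}m"
--
-- # full replacement string for each bare code letter (and reset letters)
-- _MAP = {}
-- for _i, _ch in enumerate("xrgybmcw"):
--     _MAP[_ch] = _esc(30 + _i)
--     _MAP[_ch.upper()] = _esc(30 + _i, True)
-- _MAP["N"] = RESET
-- _MAP["n"] = RESET
--
-- # '&+<lowercase letter>' -> bold form
-- _PLUSMAP = {ch: _esc(30 + i, True) for i, ch in enumerate("xrgybmcw")}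
--
--
-- def diku_to_ansi(text: str) -> str:
--     """Replace Diku color codes with ANSI escape sequences."""
--     parts = text.split("&")
--     out = [parts[0]]
--     skip = False
--     for part in parts[1:]:
--         if skip:
--             out.append(part)
--             skip = False
--         elif part == "":
--             out.append("&")
--             skip = True
--         elif part[0] == "+" and len(part) >= 2 and part[1] in _PLUSMAP:
--             out.append(_PLUSMAP[part[1]] + part[2:])
--         elif part[0] in _MAP:
--             out.append(_MAP[part[0]] + part[1:])
--         else:
--             out.append("&" + part)
--     return "".join(out)
-- ===== Notes on version B (the rewrite author's own statement) =====
-- stated objective: idiomatic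
-- what changed: Replaces the index-driven tokenizer generator (inner run-collecting while loop plus a second tagged-token dispatch loop) with a single str.split on the marker character and one pass over the parts using a precomputed char-to-escape-string table.
import Mathlib
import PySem

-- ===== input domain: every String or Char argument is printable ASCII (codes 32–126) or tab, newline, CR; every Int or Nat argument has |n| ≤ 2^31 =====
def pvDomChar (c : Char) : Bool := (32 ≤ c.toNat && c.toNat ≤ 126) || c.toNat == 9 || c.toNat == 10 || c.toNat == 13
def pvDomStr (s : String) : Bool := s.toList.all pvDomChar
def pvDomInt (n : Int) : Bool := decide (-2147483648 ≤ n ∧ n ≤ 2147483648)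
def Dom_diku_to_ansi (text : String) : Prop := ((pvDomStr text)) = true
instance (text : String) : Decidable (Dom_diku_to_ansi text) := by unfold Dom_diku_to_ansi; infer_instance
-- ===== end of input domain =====

-- B replaces A's index-driven tokenizer generator (run collection + tagged-token dispatch)
-- with a single text.split('&') followed by one pass over the parts using a precomputed
-- char → escape-string table; objective: simpler/idiomatic, same exact output.

-- ===== PORT A =====
def pvRESET : List Char := ['\x1b', '[', '0', 'm']

-- _ansi: f"\033[1;{code}m" if bold else f"\033[{code}m"
def pvAnsi (code : Int) (bold : Bool) : List Char :=
  if bold then '\x1b' :: '[' :: '1' :: ';' :: ((PySem.Int.toStr code).toList ++ ['m'])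
  else '\x1b' :: '[' :: ((PySem.Int.toStr code).toList ++ ['m'])

def pvBARE : PySem.Dict Char (Int × Bool) :=
  PySem.Dict.ofList [('x',(30,false)),('X',(30,true)),('r',(31,false)),('R',(31,true)),
    ('g',(32,false)),('G',(32,true)),('y',(33,false)),('Y',(33,true)),
    ('b',(34,false)),('B',(34,true)),('m',(35,false)),('M',(35,true)),
    ('c',(36,false)),('C',(36,true)),('w',(37,false)),('W',(37,true))]

-- _PLUS = {ch.lower(): (code, True) for ch, (code, _) in _BARE.items()}
def pvPLUS : PySem.Dict Char (Int × Bool) :=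
  PySem.Dict.ofList (pvBARE.items.map (fun p => (PySem.Chars.lowerChar p.1, (p.2.1, true))))

inductive PvTok : Type
  | text : List Char → PvTok
  | color : Int → Bool → PvTok
  | reset : PvTok
deriving DecidableEq, Repr

-- _tokenize, as recursion on the remaining characters (i is the amount consumed);
-- the inner run-collecting while loop is the takeWhile/dropWhile pair.
def pvTokenize : List Char → List PvTok
  | [] => []
  | c :: rest =>
    if c ≠ '&' then
      PvTok.text (c :: rest.takeWhile (· ≠ '&')) :: pvTokenize (rest.dropWhile (· ≠ '&'))
    else
      match rest with
      | [] => [PvTok.text ['&']]                      -- i + 1 >= n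
      | ch :: rest2 =>
        if ch = '&' then PvTok.text ['&'] :: pvTokenize rest2
        else if ch = 'N' ∨ ch = 'n' then PvTok.reset :: pvTokenize rest2
        else if ch = '+' then
          match _hr : rest2 with
          | [] => PvTok.text ['&'] :: pvTokenize (ch :: rest2)   -- i+2 < n fails; _BARE.get('+') is None
          | d :: rest3 =>
            match pvPLUS.get? d with
            | some e => PvTok.color e.1 e.2 :: pvTokenize rest3
            | none => PvTok.text ['&'] :: pvTokenize (ch :: rest2)
        else
          match pvBARE.get? ch with
          | some e => PvTok.color e.1 e.2 :: pvTokenize rest2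
          | none => PvTok.text ['&'] :: pvTokenize (ch :: rest2)
termination_by cs => cs.length
decreasing_by all_goals first
  | (simp [List.length_cons]; exact List.length_dropWhile_le _ _)
  | (simp_all [List.length_cons]; try omega)

def diku_to_ansi (text : String) : String :=
  String.ofList (PySem.Chars.join []
    ((pvTokenize text.toList).foldl (fun parts t =>
      match t with
      | PvTok.text v => parts ++ [v]
      | PvTok.color code bold => parts ++ [pvAnsi code bold]
      | PvTok.reset => parts ++ [pvRESET]) []))

-- ===== PORT B =====
def pvRESETB : List Char := ['\x1b', '[', '0', 'm']

def pvEscB (code : Int) (bold : Bool) : List Char :=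
  if bold then '\x1b' :: '[' :: '1' :: ';' :: ((PySem.Int.toStr code).toList ++ ['m'])
  else '\x1b' :: '[' :: ((PySem.Int.toStr code).toList ++ ['m'])

-- _MAP: built by the enumerate loop over "xrgybmcw", then the two reset keys
def pvMapB : PySem.Dict Char (List Char) :=
  ((((PySem.List.enumerate "xrgybmcw".toList 0).foldl
      (fun d p => (d.insert p.2 (pvEscB (30 + p.1) false)).insert (PySem.Chars.upperChar p.2) (pvEscB (30 + p.1) true))
      PySem.Dict.empty).insert 'N' pvRESETB).insert 'n' pvRESETB)

-- _PLUSMAP: comprehension over enumerate("xrgybmcw")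
def pvPlusB : PySem.Dict Char (List Char) :=
  PySem.Dict.ofList ((PySem.List.enumerate "xrgybmcw".toList 0).map (fun p => (p.2, pvEscB (30 + p.1) true)))

-- the for-loop over parts[1:] with the skip flag
def pvLoopB : List (List Char) → Bool → List Char
  | [], _ => []
  | p :: ps, skip =>
    if skip then p ++ pvLoopB ps false
    else match p with
      | [] => '&' :: pvLoopB ps true
      | c :: cs =>
        match (if c = '+' then
                 (match cs with
                  | d :: cs2 => (pvPlusB.get? d).map (fun e => e ++ cs2)
                  | [] => none)
               else none) with
        | some r => r ++ pvLoopB ps false                               -- '&+x' branch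
        | none =>
          match pvMapB.get? c with
          | some e => e ++ cs ++ pvLoopB ps false                       -- bare / reset branch
          | none => '&' :: (c :: cs) ++ pvLoopB ps false                -- literal '&'

def diku_to_ansi_alt (text : String) : String :=
  match text.toList.splitOn '&' with
  | [] => ""                                   -- unreachable: split never returns []
  | p :: ps => String.ofList (p ++ pvLoopB ps false)

-- ===== PRECONDITION & SPEC =====
def Spec_diku_to_ansi (text : String) (out : String) : Prop := out = diku_to_ansi_alt text
instance (text : String) (out : String) : Decidable (Spec_diku_to_ansi text out) := by unfold Spec_diku_to_ansi; infer_instance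

-- ===== CLAIM (what is proved, stated in full; the proofs are below) =====
def Claim_equal_diku_to_ansi : Prop := ∀ (text : String), Dom_diku_to_ansi text → Spec_diku_to_ansi text (diku_to_ansi text)

-- ===== LEMMAS AND PROOFS =====

-- the string each token contributes
def pvItemA : PvTok → List Char
  | PvTok.text v => v
  | PvTok.color code bold => pvAnsi code bold
  | PvTok.reset => pvRESET

-- B's whole result, on the character-list side
def pvOutB (cs : List Char) : List Char :=
  match cs.splitOn '&' with
  | [] => []
  | p :: ps => p ++ pvLoopB ps false

theorem pv_join_flatten : ∀ (l : List (List Char)), PySem.Chars.join [] l = l.flatten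
  | [] => rfl
  | [a] => by simp [PySem.Chars.join, List.intercalate, List.intersperse]
  | a :: b :: l => by
    have := pv_join_flatten (b :: l)
    simp [PySem.Chars.join, List.intercalate, List.intersperse] at *
    simpa using this

theorem pv_join_foldl (toks : List PvTok) (acc : List (List Char)) :
    PySem.Chars.join [] (toks.foldl (fun parts t =>
      match t with
      | PvTok.text v => parts ++ [v]
      | PvTok.color code bold => parts ++ [pvAnsi code bold]
      | PvTok.reset => parts ++ [pvRESET]) acc)
    = PySem.Chars.join [] acc ++ toks.flatMap pvItemA := by
  induction toks generalizing acc with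
  | nil => simp
  | cons t ts ih =>
    have hstep : (match t with
      | PvTok.text v => acc ++ [v]
      | PvTok.color code bold => acc ++ [pvAnsi code bold]
      | PvTok.reset => acc ++ [pvRESET]) = acc ++ [pvItemA t] := by
      cases t <;> rfl
    simp only [List.foldl_cons, hstep, ih, List.flatMap_cons]
    rw [pv_join_flatten, pv_join_flatten, List.flatten_append]
    simp

-- one-step unfoldings of A's tokenizer
theorem pv_tokA_nil : pvTokenize [] = [] := by rw [pvTokenize.eq_def]

theorem pv_tokA_run (c : Char) (cs : List Char) (h : c ≠ '&') :
    pvTokenize (c :: cs)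
      = PvTok.text (c :: cs.takeWhile (· ≠ '&')) :: pvTokenize (cs.dropWhile (· ≠ '&')) := by
  rw [pvTokenize.eq_def]; simp [h]

theorem pv_tokA_amp_end : pvTokenize ['&'] = [PvTok.text ['&']] := by
  rw [pvTokenize.eq_def]; simp

theorem pv_tokA_ampamp (cs : List Char) :
    pvTokenize ('&' :: '&' :: cs) = PvTok.text ['&'] :: pvTokenize cs := by
  rw [pvTokenize.eq_def]; simp

theorem pv_tokA_reset (ch : Char) (cs : List Char) (hN : ch = 'N' ∨ ch = 'n') :
    pvTokenize ('&' :: ch :: cs) = PvTok.reset :: pvTokenize cs := by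
  have ha : ¬ ch = '&' := by rcases hN with h | h <;> subst h <;> decide
  rw [pvTokenize.eq_def]; simp [ha, hN]

theorem pv_tokA_plus_end : pvTokenize ['&', '+'] = [PvTok.text ['&'], PvTok.text ['+']] := by
  rw [pvTokenize.eq_def]; simp
  rw [pvTokenize.eq_def]; simp
  rw [pv_tokA_nil]

theorem pv_tokA_plus_some (d : Char) (cs : List Char) (e : Int × Bool)
    (hd : pvPLUS.get? d = some e) :
    pvTokenize ('&' :: '+' :: d :: cs) = PvTok.color e.1 e.2 :: pvTokenize cs := by
  rw [pvTokenize.eq_def]; simp [hd]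

theorem pv_tokA_plus_none (d : Char) (cs : List Char) (hd : pvPLUS.get? d = none) :
    pvTokenize ('&' :: '+' :: d :: cs) = PvTok.text ['&'] :: pvTokenize ('+' :: d :: cs) := by
  rw [pvTokenize.eq_def]; simp [hd]

theorem pv_tokA_bare_some (ch : Char) (cs : List Char) (e : Int × Bool)
    (ha : ch ≠ '&') (hN : ch ≠ 'N') (hn : ch ≠ 'n') (hp : ch ≠ '+')
    (hb : pvBARE.get? ch = some e) :
    pvTokenize ('&' :: ch :: cs) = PvTok.color e.1 e.2 :: pvTokenize cs := by
  rw [pvTokenize.eq_def]; simp [ha, hN, hn, hp, hb]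

theorem pv_tokA_bare_none (ch : Char) (cs : List Char)
    (ha : ch ≠ '&') (hN : ch ≠ 'N') (hn : ch ≠ 'n') (hp : ch ≠ '+')
    (hb : pvBARE.get? ch = none) :
    pvTokenize ('&' :: ch :: cs) = PvTok.text ['&'] :: pvTokenize (ch :: cs) := by
  rw [pvTokenize.eq_def]; simp [ha, hN, hn, hp, hb]

theorem pv_A_cons (c : Char) (cs : List Char) (h : c ≠ '&') :
    (pvTokenize (c :: cs)).flatMap pvItemA = c :: (pvTokenize cs).flatMap pvItemA := by
  rw [pv_tokA_run c cs h]
  cases cs with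
  | nil => simp [pv_tokA_nil, pvItemA]
  | cons d cs2 =>
    by_cases hd : d = '&'
    · subst hd; simp [pvItemA]
    · rw [pv_tokA_run d cs2 hd]
      simp [pvItemA, hd]

theorem pv_splitOn_ne_nil (cs : List Char) : cs.splitOn '&' ≠ [] := by
  induction cs with
  | nil => simp
  | cons c cs ih =>
    by_cases h : c = '&'
    · subst h; simp [List.splitOn, List.splitOnP_cons]
    · simp only [List.splitOn, List.splitOnP_cons] at *
      simp [h] at *
      cases hs : List.splitOnP (fun x => x == '&') cs <;> simp_all

theorem pv_split_amp (cs : List Char) : ('&' :: cs).splitOn '&' = [] :: cs.splitOn '&' := by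
  simp [List.splitOn, List.splitOnP_cons]

theorem pv_split_cons (c : Char) (cs : List Char) (q : List Char) (qs : List (List Char))
    (h : c ≠ '&') (hs : cs.splitOn '&' = q :: qs) :
    (c :: cs).splitOn '&' = (c :: q) :: qs := by
  have hm : (c :: cs).splitOn '&' = List.modifyHead (fun p => c :: p) (cs.splitOn '&') := by
    simp [List.splitOn, List.splitOnP_cons, h]
  rw [hm, hs]; rfl

theorem pv_outB_eq (cs q : List Char) (qs : List (List Char)) (hs : cs.splitOn '&' = q :: qs) :
    pvOutB cs = q ++ pvLoopB qs false := by
  simp [pvOutB, hs]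

theorem pv_B_cons (c : Char) (cs : List Char) (h : c ≠ '&') :
    pvOutB (c :: cs) = c :: pvOutB cs := by
  cases hs : cs.splitOn '&' with
  | nil => exact absurd hs (pv_splitOn_ne_nil cs)
  | cons q qs =>
    rw [pv_outB_eq cs q qs hs]
    rw [show pvOutB (c :: cs) = (c :: q) ++ pvLoopB qs false from
      pv_outB_eq _ _ _ (pv_split_cons c cs q qs h hs)]
    rfl

theorem pv_B_amp (cs : List Char) :
    pvOutB ('&' :: cs) = pvLoopB (cs.splitOn '&') false := by
  simp [pvOutB, pv_split_amp]

theorem pv_B_true (cs : List Char) :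
    pvLoopB (cs.splitOn '&') true = pvOutB cs := by
  cases hs : cs.splitOn '&' with
  | nil => exact absurd hs (pv_splitOn_ne_nil cs)
  | cons q qs => rw [pv_outB_eq cs q qs hs]; simp [pvLoopB]

theorem pv_map_compat (c : Char) (h1 : c ≠ 'N') (h2 : c ≠ 'n') :
    pvMapB.get? c = (pvBARE.get? c).map (fun p => pvAnsi p.1 p.2) := by
  by_cases hc : c ∈ pvMapB.keys
  · have hk : pvMapB.keys = ['x','X','r','R','g','G','y','Y','b','B','m','M','c','C','w','W','N','n'] := by decide
    rw [hk] at hc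
    fin_cases hc <;> first | decide | (exact absurd rfl h1) | (exact absurd rfl h2)
  · have h3 : pvMapB.get? c = none := by
      rw [PySem.Dict.get?_eq_none_iff_not_mem_keys]; exact hc
    have h4 : pvBARE.get? c = none := by
      rw [PySem.Dict.get?_eq_none_iff_not_mem_keys]
      intro hm
      apply hc
      have hk : pvBARE.keys = ['x','X','r','R','g','G','y','Y','b','B','m','M','c','C','w','W'] := by decide
      rw [hk] at hm
      fin_cases hm <;> decide
    simp [h3, h4]

theorem pv_mapN : pvMapB.get? 'N' = some pvRESET := by decide
theorem pv_mapn : pvMapB.get? 'n' = some pvRESET := by decide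
theorem pv_mapPlusNone : pvMapB.get? '+' = none := by decide

theorem pv_plus_compat (d : Char) :
    pvPlusB.get? d = (pvPLUS.get? d).map (fun p => pvAnsi p.1 p.2) := by
  by_cases hd : d ∈ pvPlusB.keys
  · have hk : pvPlusB.keys = ['x','r','g','y','b','m','c','w'] := by decide
    rw [hk] at hd
    fin_cases hd <;> decide
  · have h3 : pvPlusB.get? d = none := by
      rw [PySem.Dict.get?_eq_none_iff_not_mem_keys]; exact hd
    have h4 : pvPLUS.get? d = none := by
      rw [PySem.Dict.get?_eq_none_iff_not_mem_keys]
      intro hm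
      apply hd
      have hk : pvPLUS.keys = ['x','r','g','y','b','m','c','w'] := by decide
      have hk2 : pvPlusB.keys = ['x','r','g','y','b','m','c','w'] := by decide
      rw [hk] at hm; rw [hk2]; exact hm
    simp [h3, h4]

theorem pv_plus_key_ne_amp (d : Char) (e : Int × Bool) (hd : pvPLUS.get? d = some e) : d ≠ '&' := by
  intro h; subst h
  rw [show pvPLUS.get? '&' = none from by decide] at hd
  simp at hd

theorem pv_main_aux : ∀ (n : Nat) (cs : List Char), cs.length ≤ n →
    (pvTokenize cs).flatMap pvItemA = pvOutB cs := by
  intro n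
  induction n with
  | zero =>
    intro cs hcs
    have h0 : cs = [] := by cases cs <;> simp_all
    subst h0
    simp [pv_tokA_nil, pvOutB, List.splitOn, pvLoopB]
  | succ n ih =>
    intro cs hcs
    match cs with
    | [] => simp [pv_tokA_nil, pvOutB, List.splitOn, pvLoopB]
    | c :: rest =>
      have hrest : rest.length ≤ n := by simp [List.length_cons] at hcs; omega
      by_cases hc : c = '&'
      case neg =>
        rw [pv_A_cons c rest hc, pv_B_cons c rest hc, ih rest hrest]
      case pos =>
        subst hc
        rw [pv_B_amp]
        match rest with
        | [] => simp [pv_tokA_amp_end, pvItemA, List.splitOn, pvLoopB]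
        | ch :: rest2 =>
          have hrest2 : rest2.length ≤ n := by simp [List.length_cons] at hcs; omega
          cases hs : rest2.splitOn '&' with
          | nil => exact absurd hs (pv_splitOn_ne_nil rest2)
          | cons q qs =>
          by_cases ha : ch = '&'
          · subst ha
            rw [pv_split_amp, pv_tokA_ampamp]
            simp only [pvLoopB, List.flatMap_cons]
            rw [pv_B_true rest2, ← ih rest2 hrest2]
            simp [pvItemA, pvLoopB]
          · by_cases hN : ch = 'N' ∨ ch = 'n'
            · have hplus : ch ≠ '+' := by rcases hN with h | h <;> subst h <;> decide
              have hmap : pvMapB.get? ch = some pvRESET := by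
                rcases hN with h | h <;> subst h
                · exact pv_mapN
                · exact pv_mapn
              rw [pv_split_cons ch rest2 q qs ha hs, pv_tokA_reset ch rest2 hN]
              simp [pvLoopB, hplus, hmap, pvItemA, ih rest2 hrest2, pv_outB_eq rest2 q qs hs]
            · push_neg at hN
              by_cases hp : ch = '+'
              · subst hp
                match rest2, hs with
                | [], hs =>
                  rw [pv_tokA_plus_end]
                  simp [List.splitOn, pvLoopB, pv_mapPlusNone, pvItemA]
                | d :: rest3, hs =>
                  have hrest3 : rest3.length ≤ n := by simp [List.length_cons] at hcs; omega
                  cases hd : pvPLUS.get? d with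
                  | some e =>
                    have hdne : d ≠ '&' := pv_plus_key_ne_amp d e hd
                    cases hs3 : rest3.splitOn '&' with
                    | nil => exact absurd hs3 (pv_splitOn_ne_nil rest3)
                    | cons q3 qs3 =>
                      rw [pv_split_cons '+' (d :: rest3) _ _ (by decide)
                            (pv_split_cons d rest3 q3 qs3 hdne hs3)]
                      rw [pv_tokA_plus_some d rest3 e hd]
                      have hpb : pvPlusB.get? d = some (pvAnsi e.1 e.2) := by
                        rw [pv_plus_compat, hd]; rfl
                      simp [pvLoopB, hpb, pvItemA, ih rest3 hrest3, pv_outB_eq rest3 q3 qs3 hs3]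
                  | none =>
                    rw [pv_split_cons '+' (d :: rest3) q qs (by decide) hs]
                    rw [pv_tokA_plus_none d rest3 hd]
                    have hA2 : (pvTokenize ('+' :: d :: rest3)).flatMap pvItemA
                        = '+' :: (pvTokenize (d :: rest3)).flatMap pvItemA := pv_A_cons _ _ (by decide)
                    have hplusnone : (match q with
                        | d2 :: cs2 => (pvPlusB.get? d2).map (fun e => e ++ cs2)
                        | [] => (none : Option (List Char))) = none := by
                      by_cases he : d = '&'
                      · subst he
                        rw [pv_split_amp] at hs
                        have hq : q = [] := by injection hs with h1 _; exact h1.symm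
                        simp [hq]
                      · cases hs0 : rest3.splitOn '&' with
                        | nil => exact absurd hs0 (pv_splitOn_ne_nil rest3)
                        | cons q0 qs0 =>
                          rw [pv_split_cons d rest3 q0 qs0 he hs0] at hs
                          have hq : q = d :: q0 := by injection hs with h1 _; exact h1.symm
                          subst hq
                          simp [pv_plus_compat, hd]
                    simp only [List.flatMap_cons, hA2]
                    rw [show (pvTokenize (d :: rest3)).flatMap pvItemA = pvOutB (d :: rest3) from
                      ih (d :: rest3) hrest2]
                    simp [pvLoopB, hplusnone, pv_mapPlusNone, pvItemA,
                      pv_outB_eq (d :: rest3) q qs hs]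
              · cases hb : pvBARE.get? ch with
                | some e =>
                  rw [pv_split_cons ch rest2 q qs ha hs]
                  rw [pv_tokA_bare_some ch rest2 e ha hN.1 hN.2 hp hb]
                  have hmb : pvMapB.get? ch = some (pvAnsi e.1 e.2) := by
                    rw [pv_map_compat ch hN.1 hN.2, hb]; rfl
                  simp [pvLoopB, hp, hmb, pvItemA, ih rest2 hrest2, pv_outB_eq rest2 q qs hs]
                | none =>
                  rw [pv_split_cons ch rest2 q qs ha hs]
                  rw [pv_tokA_bare_none ch rest2 ha hN.1 hN.2 hp hb]
                  have hA2 : (pvTokenize (ch :: rest2)).flatMap pvItemA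
                      = ch :: (pvTokenize rest2).flatMap pvItemA := pv_A_cons _ _ ha
                  have hmb : pvMapB.get? ch = none := by
                    rw [pv_map_compat ch hN.1 hN.2, hb]; rfl
                  simp only [List.flatMap_cons, hA2]
                  rw [show (pvTokenize rest2).flatMap pvItemA = pvOutB rest2 from ih rest2 hrest2]
                  simp [pvLoopB, hp, hmb, pvItemA, pv_outB_eq rest2 q qs hs]

theorem pv_main (cs : List Char) :
    (pvTokenize cs).flatMap pvItemA = pvOutB cs :=
  pv_main_aux cs.length cs le_rfl

-- ===== VERDICT (by name: the statement is the Claim_ definition above) =====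
theorem diku_to_ansi_spec : Claim_equal_diku_to_ansi := by
  intro text _
  unfold Spec_diku_to_ansi diku_to_ansi diku_to_ansi_alt
  have h := pv_main text.toList
  rw [pv_join_foldl, h]
  cases hs : text.toList.splitOn '&' with
  | nil => exact absurd hs (pv_splitOn_ne_nil _)
  | cons p ps => simp [pvOutB, hs, PySem.Chars.join, List.intercalate]
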